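-- pv_equiv track=rewrite | github.com/gmnr/advent-of-code | 2015/03/day03.py | robo_santa
-- ===== SOURCE A (Python) =====
-- from operator import add
--
-- def robo_santa(itinerary):
--     coord = set()
--     curr1 = (0, 0)
--     curr2 = (0, 0)
--     dirs = {"^": (0, 1), ">": (1, 0), "<": (-1, 0), "v": (0, -1)}
--     turn1 = True
--     for mov in itinerary:
--         if turn1:
--             nxt = tuple(map(add, dirs[mov], curr1))
--             coord.add(nxt)
--             curr1 = nxt
--             turn1 = False
--         else:
--             nxt = tuple(map(add, dirs[mov], curr2))
--             coord.add(nxt)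
--             curr2 = nxt
--             turn1 = True
--     return len(coord)
-- ===== SOURCE B (Python) =====
-- def robo_santa(itinerary):
--     dirs = {"^": (0, 1), ">": (1, 0), "<": (-1, 0), "v": (0, -1)}
--     visited = set()
--     for moves in (itinerary[0::2], itinerary[1::2]):
--         x, y = 0, 0
--         for mov in moves:
--             dx, dy = dirs[mov]
--             x += dx
--             y += dy
--             visited.add((x, y))
--     return len(visited)
-- ===== Notes on version B (the rewrite author's own statement) =====
-- stated objective: alternative
-- what changed: Replaces A's single alternating-turn loop (Bool flag, two tracked positions) by partitioning the itinerary into the two step-2 slices and running two independent walks, each from (0,0), into one shared set.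
import Mathlib
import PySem

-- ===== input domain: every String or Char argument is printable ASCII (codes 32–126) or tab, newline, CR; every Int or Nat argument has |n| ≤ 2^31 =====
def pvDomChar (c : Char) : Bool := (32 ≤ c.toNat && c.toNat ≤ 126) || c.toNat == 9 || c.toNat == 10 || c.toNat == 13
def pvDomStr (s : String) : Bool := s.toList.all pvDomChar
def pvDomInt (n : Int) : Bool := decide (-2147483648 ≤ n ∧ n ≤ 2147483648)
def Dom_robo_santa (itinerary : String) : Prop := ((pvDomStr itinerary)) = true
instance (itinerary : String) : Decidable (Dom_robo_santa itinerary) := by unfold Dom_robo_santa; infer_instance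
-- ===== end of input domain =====

-- B replaces A's alternating-turn single loop by splitting the itinerary into the
-- two step-2 slices and running two independent walks into one shared set (objective: alternative decomposition).

-- ===== PORT A =====
-- the dict literal dirs = {"^": (0,1), ">": (1,0), "<": (-1,0), "v": (0,-1)}
def pvDirs : PySem.Dict Char (Int × Int) :=
  ((((PySem.Dict.empty).insert '^' ((0 : Int), (1 : Int))).insert '>' (1, 0)).insert '<' (-1, 0)).insert 'v' (0, -1)

-- loop body of A; dirs[mov] raises KeyError for other chars — those inputs are excluded by Pre_robo_santa,
-- so getD's default is never used on admitted inputs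
def pvLoopA (st : PySem.Set (Int × Int) × (Int × Int) × (Int × Int) × Bool) (mov : Char) :
    PySem.Set (Int × Int) × (Int × Int) × (Int × Int) × Bool :=
  let (coord, curr1, curr2, turn1) := st
  if turn1 then
    let d := pvDirs.getD mov (0, 0)
    let nxt := (d.1 + curr1.1, d.2 + curr1.2)
    (PySem.Set.add coord nxt, nxt, curr2, false)
  else
    let d := pvDirs.getD mov (0, 0)
    let nxt := (d.1 + curr2.1, d.2 + curr2.2)
    (PySem.Set.add coord nxt, curr1, nxt, true)

def robo_santa (itinerary : String) : Int :=
  let fin := itinerary.toList.foldl pvLoopA (PySem.Set.empty, (0, 0), (0, 0), true)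
  PySem.Set.len fin.1

-- ===== PORT B =====
-- port of the step-2 slice s[0::2] (characters at even indices); exact on lists
def pvEvens : List Char → List Char
  | [] => []
  | [a] => [a]
  | a :: _ :: t => a :: pvEvens t

-- port of s[1::2] (characters at odd indices)
def pvOdds (l : List Char) : List Char := pvEvens (l.drop 1)

-- inner loop body of B: advance (x, y) by dirs[mov] and add the new position
def pvLoopB (st : (Int × Int) × PySem.Set (Int × Int)) (mov : Char) :
    (Int × Int) × PySem.Set (Int × Int) :=
  let d := pvDirs.getD mov (0, 0)
  let p := (st.1.1 + d.1, st.1.2 + d.2)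
  (p, PySem.Set.add st.2 p)

def robo_santa_alt (itinerary : String) : Int :=
  let l := itinerary.toList
  let r1 := (pvEvens l).foldl pvLoopB ((0, 0), PySem.Set.empty)
  let r2 := (pvOdds l).foldl pvLoopB ((0, 0), r1.2)
  PySem.Set.len r2.2

-- ===== PRECONDITION & SPEC =====
-- Pre_ excludes exactly the strings containing a character other than ^ > < v, on which A raises KeyError
def Pre_robo_santa (itinerary : String) : Prop :=
  (itinerary.toList.all (fun c => c == '^' || c == '>' || c == '<' || c == 'v')) = true
instance (itinerary : String) : Decidable (Pre_robo_santa itinerary) := by unfold Pre_robo_santa; infer_instance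
def pvWitness_robo_santa : String := "^v<>"

def Spec_robo_santa (itinerary : String) (out : Int) : Prop := out = robo_santa_alt itinerary
instance (itinerary : String) (out : Int) : Decidable (Spec_robo_santa itinerary out) := by unfold Spec_robo_santa; infer_instance

-- ===== CLAIM (what is proved, stated in full; the proofs are below) =====
def Claim_equal_robo_santa : Prop := ∀ (itinerary : String), Dom_robo_santa itinerary → Pre_robo_santa itinerary → Spec_robo_santa itinerary (robo_santa itinerary)

-- ===== LEMMAS AND PROOFS =====

-- one move from position c
def pvStep (mov : Char) (c : Int × Int) : Int × Int :=
  (c.1 + (pvDirs.getD mov (0, 0)).1, c.2 + (pvDirs.getD mov (0, 0)).2)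

-- positions visited by a single walker starting at c (excluding c itself)
def pvVisits (c : Int × Int) : List Char → List (Int × Int)
  | [] => []
  | m :: t => pvStep m c :: pvVisits (pvStep m c) t

theorem pvEvens_cons (a : Char) (t : List Char) : pvEvens (a :: t) = a :: pvOdds t := by
  cases t <;> rfl

theorem pvOdds_cons (a : Char) (t : List Char) : pvOdds (a :: t) = pvEvens t := rfl

-- membership characterisation of A's loop, for both values of the turn flag
theorem memA (ms : List Char) : ∀ (s : PySem.Set (Int × Int)) (c1 c2 : Int × Int) (x : Int × Int),
    (x ∈ (ms.foldl pvLoopA (s, c1, c2, true)).1 ↔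
      x ∈ s ∨ x ∈ pvVisits c1 (pvEvens ms) ∨ x ∈ pvVisits c2 (pvOdds ms)) ∧
    (x ∈ (ms.foldl pvLoopA (s, c1, c2, false)).1 ↔
      x ∈ s ∨ x ∈ pvVisits c2 (pvEvens ms) ∨ x ∈ pvVisits c1 (pvOdds ms)) := by
  induction ms with
  | nil => intro s c1 c2 x; simp [pvEvens, pvOdds, pvVisits]
  | cons m t ih =>
    intro s c1 c2 x
    have hstep1 : ((pvDirs.getD m (0, 0)).1 + c1.1, (pvDirs.getD m (0, 0)).2 + c1.2) = pvStep m c1 := by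
      simp [pvStep, Int.add_comm]
    have hstep2 : ((pvDirs.getD m (0, 0)).1 + c2.1, (pvDirs.getD m (0, 0)).2 + c2.2) = pvStep m c2 := by
      simp [pvStep, Int.add_comm]
    constructor
    · have h1 : (m :: t).foldl pvLoopA (s, c1, c2, true) =
          t.foldl pvLoopA (PySem.Set.add s (pvStep m c1), pvStep m c1, c2, false) := by
        simp [List.foldl_cons, pvLoopA, hstep1]
      rw [h1, (ih _ _ _ x).2, pvEvens_cons, pvOdds_cons]
      simp [pvVisits, PySem.Set.mem_add]
      tauto
    · have h1 : (m :: t).foldl pvLoopA (s, c1, c2, false) =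
          t.foldl pvLoopA (PySem.Set.add s (pvStep m c2), c1, pvStep m c2, true) := by
        simp [List.foldl_cons, pvLoopA, hstep2]
      rw [h1, (ih _ _ _ x).1, pvEvens_cons, pvOdds_cons]
      simp [pvVisits, PySem.Set.mem_add]
      tauto

-- membership characterisation of B's walk loop
theorem memB (ms : List Char) : ∀ (p : Int × Int) (s : PySem.Set (Int × Int)) (x : Int × Int),
    x ∈ (ms.foldl pvLoopB (p, s)).2 ↔ x ∈ s ∨ x ∈ pvVisits p ms := by
  induction ms with
  | nil => intro p s x; simp [pvVisits]
  | cons m t ih =>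
    intro p s x
    have h1 : (m :: t).foldl pvLoopB (p, s) =
        t.foldl pvLoopB (pvStep m p, PySem.Set.add s (pvStep m p)) := by
      simp [List.foldl_cons, pvLoopB, pvStep]
    rw [h1, ih]
    simp [pvVisits, PySem.Set.mem_add]
    tauto

-- A's loop keeps the set duplicate-free
theorem nodupA (ms : List Char) :
    ∀ (st : PySem.Set (Int × Int) × (Int × Int) × (Int × Int) × Bool),
    st.1.Nodup → (ms.foldl pvLoopA st).1.Nodup := by
  induction ms with
  | nil => intro st h; exact h
  | cons m t ih =>
    intro st h
    rw [List.foldl_cons]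
    apply ih
    obtain ⟨s, c1, c2, turn⟩ := st
    cases turn <;> simpa [pvLoopA] using PySem.Set.nodup_add _ _ h

-- B's loop keeps the set duplicate-free
theorem nodupB (ms : List Char) :
    ∀ (st : (Int × Int) × PySem.Set (Int × Int)), st.2.Nodup → (ms.foldl pvLoopB st).2.Nodup := by
  induction ms with
  | nil => intro st h; exact h
  | cons m t ih =>
    intro st h
    rw [List.foldl_cons]
    apply ih
    simpa [pvLoopB] using PySem.Set.nodup_add _ _ h

-- ===== VERDICT (by name: the statement is the Claim_ definition above) =====
theorem robo_santa_spec : Claim_equal_robo_santa := by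
  intro itinerary _ _
  unfold Spec_robo_santa robo_santa robo_santa_alt
  set l := itinerary.toList with hl
  have hA : ((l.foldl pvLoopA (PySem.Set.empty, (0, 0), (0, 0), true)).1).Nodup :=
    nodupA l _ (by simp [PySem.Set.empty])
  have hB1 : (((pvEvens l).foldl pvLoopB ((0, 0), PySem.Set.empty)).2).Nodup :=
    nodupB _ _ (by simp [PySem.Set.empty])
  have hB : (((pvOdds l).foldl pvLoopB
      ((0, 0), ((pvEvens l).foldl pvLoopB ((0, 0), PySem.Set.empty)).2)).2).Nodup :=
    nodupB _ _ hB1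
  have hmem : ∀ x : Int × Int,
      x ∈ (l.foldl pvLoopA (PySem.Set.empty, (0, 0), (0, 0), true)).1 ↔
      x ∈ ((pvOdds l).foldl pvLoopB
        ((0, 0), ((pvEvens l).foldl pvLoopB ((0, 0), PySem.Set.empty)).2)).2 := by
    intro x
    rw [(memA l PySem.Set.empty (0, 0) (0, 0) x).1, memB, memB]
    simp [PySem.Set.empty]
  have hperm := (List.perm_ext_iff_of_nodup hA hB).2 hmem
  simp only [PySem.Set.len]
  exact_mod_cast hperm.length_eq
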